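-- pv_equiv track=rewrite | github.com/raiders032/PS | python/Programmers/N으로 표현.py | solution
-- ===== SOURCE A (Python) =====
-- def solution(N, number):
--     dp = [{int(str(N) * i)} for i in range(1, 9)]
--
--     for N_count in range(8):
--         for i in range((N_count - 1) // 2 + 1):
--             for left_op in dp[i]:
--                 for right_op in dp[N_count - i - 1]:
--                     dp[N_count].add(left_op + right_op)
--                     dp[N_count].add(left_op - right_op)
--                     dp[N_count].add(right_op - left_op)
--                     dp[N_count].add(left_op * right_op)
--                     if right_op != 0:
--                         dp[N_count].add(left_op // right_op)
--                     if left_op != 0: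
--                         dp[N_count].add(right_op // left_op)
--
--         if number in dp[N_count]:
--             return N_count + 1
--     else:
--         return -1
-- ===== SOURCE B (Python) =====
-- def solution(N, number):
--     # Uniform-cost (bucket-queue Dijkstra) search: settle each distinct value once,
--     # at its minimal count, combining it only with already-settled partners.
--     pending = [[] for _ in range(9)]   # pending[c]: candidate values buildable from c copies of N
--     for k in range(1, 9):
--         pending[k].append(int(str(N) * k))
--     seen = set()
--     by_count = [[] for _ in range(9)]  # by_count[c]: values whose minimal count is c
--     for c in range(1, 9):
--         for v in pending[c]:
--             if v in seen:
--                 continue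
--             if v == number:
--                 return c
--             seen.add(v)
--             by_count[c].append(v)
--             for cu in range(1, 9 - c):
--                 bucket = pending[c + cu]
--                 for u in by_count[cu]:
--                     bucket.append(v + u)
--                     bucket.append(v - u)
--                     bucket.append(u - v)
--                     bucket.append(v * u)
--                     if u != 0:
--                         bucket.append(v // u)
--                     if v != 0:
--                         bucket.append(u // v)
--     return -1
-- ===== Notes on version B (the rewrite author's own statement) =====
-- stated objective: alternative
-- what changed: Replaces A's per-count family of sets (each level fully recombined from half-range splits, then tested) by a bucket-queue uniform-cost search: a global seen-set settles each distinct value exactly once at its minimal count, a settled value is combined only with already-settled partners whose counts fit the 8-budget, new candidates are pushed into the bucket of their count sum, and the answer is the bucket the target is first popped from.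
import Mathlib
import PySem

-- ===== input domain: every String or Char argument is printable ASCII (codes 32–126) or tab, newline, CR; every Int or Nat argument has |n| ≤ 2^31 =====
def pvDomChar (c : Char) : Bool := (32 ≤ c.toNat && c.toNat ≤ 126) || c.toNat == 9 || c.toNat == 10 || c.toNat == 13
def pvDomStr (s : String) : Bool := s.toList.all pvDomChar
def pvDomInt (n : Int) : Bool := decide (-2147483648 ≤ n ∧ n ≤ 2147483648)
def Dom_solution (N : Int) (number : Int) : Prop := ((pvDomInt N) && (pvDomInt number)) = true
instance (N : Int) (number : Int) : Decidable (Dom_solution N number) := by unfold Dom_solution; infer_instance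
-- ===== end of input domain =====

-- B replaces A's per-level set DP (levels recombined from half-range splits, then tested)
-- by a bucket-queue uniform-cost search settling each distinct value once at its minimal
-- count and combining it only with already-settled partners (objective: alternative).


-- ===== PORT A =====
-- int(str(N) * c) for a Nat repetition count c; exact for 0 ≤ N (Pre_); the getD 0 is unreachable
-- under Pre_ (str of a nonnegative int is all digits, so int() parses).
def pvRepunit (N : Int) (c : Nat) : Int :=
  (PySem.Int.ofStr? (String.join (List.replicate c (PySem.Int.toStr N)))).getD 0

-- the inner three loops of A for one value of N_count = k: fold over i in
-- range((N_count-1)//2 + 1), then over the two (finalized) sets dp[i] and dp[N_count-i-1],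
-- adding the six candidate values (two of them guarded) into dp[N_count].
def pvCombineA (dp : List (PySem.Set Int)) (k : Nat) : PySem.Set Int :=
  (PySem.List.pyRange 0 (PySem.Int.floordiv ((k : Int) - 1) 2 + 1) 1).foldl (fun s i =>
    (PySem.List.pyGetD dp i PySem.Set.empty).foldl (fun s a =>
      (PySem.List.pyGetD dp ((k : Int) - i - 1) PySem.Set.empty).foldl (fun s b =>
        let s := PySem.Set.add s (a + b)
        let s := PySem.Set.add s (a - b)
        let s := PySem.Set.add s (b - a)
        let s := PySem.Set.add s (a * b)
        let s := if b ≠ 0 then PySem.Set.add s (PySem.Int.floordiv a b) else s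
        if a ≠ 0 then PySem.Set.add s (PySem.Int.floordiv b a) else s) s) s)
    (PySem.List.pyGetD dp (k : Int) PySem.Set.empty)

-- A's outer for N_count in range(8) with the early return modelled by the recursion stopping;
-- dp[N_count] is mutated in place = the list entry k is overwritten with the combined set.
def pvLoopA (N : Int) (number : Int) (dp : List (PySem.Set Int)) (k : Nat) : Int :=
  if k < 8 then
    let s := pvCombineA dp k
    if PySem.Set.contains s number then (k : Int) + 1
    else pvLoopA N number (PySem.List.pySetD dp (k : Int) s) (k + 1)
  else -1
termination_by 8 - k

def solution (N : Int) (number : Int) : Int :=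
  let dp := (PySem.List.pyRange 1 9 1).map (fun i => PySem.Set.ofList [pvRepunit N i.toNat])
  pvLoopA N number dp 0

-- ===== PORT B =====
-- the six appends to the target bucket for the settled value v and one partner u
-- append-only bucket lists are stored newest-first (cons) and reversed when read;
-- this is Python's list.append order, exactly
def pvOpsPush (v u : Int) (l : List Int) : List Int :=
  let l := (v + u) :: l
  let l := (v - u) :: l
  let l := (u - v) :: l
  let l := (v * u) :: l
  let l := if u ≠ 0 then PySem.Int.floordiv v u :: l else l
  if v ≠ 0 then PySem.Int.floordiv u v :: l else l

-- B's two partner loops: for cu in range(1, 9-c), append the combinations of v with every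
-- settled value u in by_count[cu] to pending[c+cu]
def pvCombineB (v : Int) (c : Nat) (byc pending : List (List Int)) : List (List Int) :=
  (List.range' 1 (8 - c)).foldl (fun p cu =>
    p.set (c + cu) (((byc.getD cu []).reverse).foldl (fun b u => pvOpsPush v u b) (p.getD (c + cu) []))) pending

-- B's inner for v in pending[c]: skip seen values, return on the target, settle the rest
def pvBucketLoop (number : Int) (c : Nat) (vs : List Int) (seen : PySem.Set Int)
    (byc pending : List (List Int)) : Sum Int (PySem.Set Int × List (List Int) × List (List Int)) :=
  match vs with
  | [] => Sum.inr (seen, byc, pending)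
  | v :: rest =>
    if PySem.Set.contains seen v then pvBucketLoop number c rest seen byc pending
    else if v = number then Sum.inl (c : Int)
    else
      pvBucketLoop number c rest (PySem.Set.add seen v) (byc.set c (v :: byc.getD c []))
        (pvCombineB v c (byc.set c (v :: byc.getD c [])) pending)

-- B's outer for c in range(1, 9) (pending[c] is never appended during bucket c: pushes go to c+cu ≥ c+1)
def pvOuterB (number : Int) (c : Nat) (seen : PySem.Set Int) (byc pending : List (List Int)) : Int :=
  if c < 9 then
    match pvBucketLoop number c ((pending.getD c []).reverse) seen byc pending with
    | Sum.inl r => r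
    | Sum.inr (seen', byc', pending') => pvOuterB number (c + 1) seen' byc' pending'
  else -1
termination_by 9 - c

def solution_alt (N : Int) (number : Int) : Int :=
  let pending := (List.range' 1 8).foldl
    (fun p k => p.set k (pvRepunit N k :: p.getD k [])) (List.replicate 9 ([] : List Int))
  pvOuterB number 1 PySem.Set.empty (List.replicate 9 []) pending

-- ===== PRECONDITION & SPEC =====
-- Pre_ excludes N < 0, where A raises ValueError (int(str(N) * i) for i ≥ 2 parses e.g. "-5-5");
-- B raises the same ValueError there.
def Pre_solution (N : Int) (number : Int) : Prop := 0 ≤ N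
instance (N : Int) (number : Int) : Decidable (Pre_solution N number) := by
  unfold Pre_solution; infer_instance
def pvWitness_solution : Int × Int := (5, 12)

def Spec_solution (N : Int) (number : Int) (out : Int) : Prop := out = solution_alt N number
instance (N : Int) (number : Int) (out : Int) : Decidable (Spec_solution N number out) := by
  unfold Spec_solution; infer_instance

-- ===== CLAIM =====
def Claim_equal_solution : Prop := ∀ (N : Int) (number : Int), Dom_solution N number →
  Pre_solution N number → Spec_solution N number (solution N number)

-- ===== LEMMAS AND PROOFS =====

-- the candidate values built from one operand pair: B pushes the six of pvOps6;
-- pvOps4 is one operand order (the shape of pvReach's combination rule)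
def pvOps4 (a b x : Int) : Prop :=
  x = a + b ∨ x = a - b ∨ x = a * b ∨ (b ≠ 0 ∧ x = PySem.Int.floordiv a b)
def pvOps6 (a b x : Int) : Prop :=
  x = a + b ∨ x = a - b ∨ x = b - a ∨ x = a * b ∨
    (b ≠ 0 ∧ x = PySem.Int.floordiv a b) ∨ (a ≠ 0 ∧ x = PySem.Int.floordiv b a)

theorem pvOps6_iff (a b x : Int) : pvOps6 a b x ↔ pvOps4 a b x ∨ pvOps4 b a x := by
  unfold pvOps4 pvOps6
  constructor
  · rintro (h | h | h | h | h | h) <;> subst_eqs <;>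
      simp [Int.add_comm, Int.mul_comm] <;> tauto
  · rintro ((h | h | h | h) | (h | h | h | h)) <;> subst_eqs <;>
      simp [Int.add_comm, Int.mul_comm] <;> tauto

theorem pv_ops6_symm (a b x : Int) : pvOps6 a b x ↔ pvOps6 b a x := by
  rw [pvOps6_iff, pvOps6_iff]; tauto

-- values reachable with exactly c ≥ 1 copies of N
inductive pvReach (N : Int) : Nat → Int → Prop
  | rep (c : Nat) (hc : 1 ≤ c) : pvReach N c (pvRepunit N c)
  | comb {i c : Nat} {a b x : Int} : 1 ≤ i → i < c → pvReach N i a → pvReach N (c - i) b →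
      pvOps4 a b x → pvReach N c x

theorem pv_reach_pos (N : Int) (c : Nat) (x : Int) (h : pvReach N c x) : 1 ≤ c := by
  cases h with
  | rep _ hc => exact hc
  | comb h1 h2 _ _ _ => omega

-- c is the minimal count of x
def pvMin (N : Int) (x : Int) (c : Nat) : Prop :=
  pvReach N c x ∧ ∀ j, j < c → ¬ pvReach N j x

theorem pv_min_unique {N x : Int} {c c' : Nat} (h1 : pvMin N x c) (h2 : pvMin N x c') :
    c = c' := by
  by_contra hne
  rcases Nat.lt_or_ge c c' with h | h
  · exact h2.2 c h h1.1
  · exact h1.2 c' (by omega) h2.1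

theorem pv_exists_min (N : Int) : ∀ (c : Nat) (x : Int), pvReach N c x →
    ∃ m, m ≤ c ∧ pvMin N x m := by
  intro c
  induction c using Nat.strong_induction_on with
  | _ c ih =>
    intro x h
    by_cases hl : ∃ j, j < c ∧ pvReach N j x
    · obtain ⟨j, hj, hR⟩ := hl
      obtain ⟨m, hm, hmin⟩ := ih j hj x hR
      exact ⟨m, by omega, hmin⟩
    · exact ⟨c, le_rfl, h, fun j hj hR => hl ⟨j, hj, hR⟩⟩

theorem pv_reach_ops6 {N v u x : Int} {cv cu : Nat} (hv : pvReach N cv v)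
    (hu : pvReach N cu u) (h : pvOps6 v u x) : pvReach N (cv + cu) x := by
  have hv1 := pv_reach_pos _ _ _ hv
  have hu1 := pv_reach_pos _ _ _ hu
  rcases (pvOps6_iff v u x).mp h with h4 | h4
  · exact pvReach.comb (i := cv) hv1 (by omega) hv
      (by rwa [show cv + cu - cv = cu by omega]) h4
  · exact pvReach.comb (i := cu) hu1 (by omega) hu
      (by rwa [show cv + cu - cu = cv by omega]) h4

-- ===== A-side lemmas =====

-- membership through a fold that per element y adds exactly the values satisfying P y
theorem pv_mem_foldl {β : Type} (f : PySem.Set Int → β → PySem.Set Int) (P : β → Int → Prop)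
    (hf : ∀ s y x, x ∈ f s y ↔ x ∈ s ∨ P y x) (l : List β) (s : PySem.Set Int) (x : Int) :
    x ∈ l.foldl f s ↔ x ∈ s ∨ ∃ y ∈ l, P y x := by
  induction l generalizing s with
  | nil => simp
  | cons y t ih =>
    rw [List.foldl_cons, ih, hf]
    simp only [List.mem_cons]
    constructor
    · rintro ((h | h) | ⟨z, hz, hp⟩)
      · exact Or.inl h
      · exact Or.inr ⟨y, Or.inl rfl, h⟩
      · exact Or.inr ⟨z, Or.inr hz, hp⟩
    · rintro (h | ⟨z, (rfl | hz), hp⟩)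
      · exact Or.inl (Or.inl h)
      · exact Or.inl (Or.inr hp)
      · exact Or.inr ⟨z, hz, hp⟩

theorem pv_mem_combineA (dp : List (PySem.Set Int)) (k : Nat) (x : Int) :
    x ∈ pvCombineA dp k ↔ x ∈ PySem.List.pyGetD dp (k : Int) PySem.Set.empty ∨
      ∃ i ∈ PySem.List.pyRange 0 (PySem.Int.floordiv ((k : Int) - 1) 2 + 1) 1,
        ∃ a ∈ PySem.List.pyGetD dp i PySem.Set.empty,
          ∃ b ∈ PySem.List.pyGetD dp ((k : Int) - i - 1) PySem.Set.empty, pvOps6 a b x := by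
  unfold pvCombineA
  rw [pv_mem_foldl _ (fun i x => ∃ a ∈ PySem.List.pyGetD dp i PySem.Set.empty,
        ∃ b ∈ PySem.List.pyGetD dp ((k : Int) - i - 1) PySem.Set.empty, pvOps6 a b x)]
  intro s i x
  rw [pv_mem_foldl _ (fun a x =>
        ∃ b ∈ PySem.List.pyGetD dp ((k : Int) - i - 1) PySem.Set.empty, pvOps6 a b x)]
  intro s a x
  rw [pv_mem_foldl _ (fun b x => pvOps6 a b x)]
  intro s b x
  simp only [pvOps6]
  by_cases ha : a = 0 <;> by_cases hb : b = 0 <;>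
    simp [ha, hb, PySem.Set.mem_add] <;> tauto

-- s is exactly the level-c set
def pvGood (N : Int) (s : PySem.Set Int) (c : Nat) : Prop := ∀ x, x ∈ s ↔ pvReach N c x

-- invariant of A's loop before iteration k: entries below k are final levels, the rest initial
def pvInvA (N : Int) (dp : List (PySem.Set Int)) (k : Nat) : Prop :=
  dp.length = 8 ∧ ∀ j : Nat, j < 8 →
    (j < k → pvGood N (PySem.List.pyGetD dp (j : Int) PySem.Set.empty) (j + 1)) ∧
    (k ≤ j → PySem.List.pyGetD dp (j : Int) PySem.Set.empty =
      PySem.Set.ofList [pvRepunit N (j + 1)])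

theorem pv_combineA_good (N : Int) (dp : List (PySem.Set Int)) (k : Nat)
    (hinv : pvInvA N dp k) (hk : k < 8) : pvGood N (pvCombineA dp k) (k + 1) := by
  intro x
  rw [pv_mem_combineA]
  have hbase : PySem.List.pyGetD dp (k : Int) PySem.Set.empty =
      PySem.Set.ofList [pvRepunit N (k + 1)] := (hinv.2 k hk).2 (le_refl k)
  constructor
  · rintro (hx | ⟨i, hi, a, ha, b, hb, hops⟩)
    · rw [hbase] at hx
      simp [PySem.Set.mem_ofList] at hx
      rw [hx]; exact pvReach.rep (k + 1) (by omega)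
    · rw [PySem.List.mem_pyRange_one] at hi
      rcases Nat.eq_zero_or_pos k with rfl | hkpos
      · exfalso
        have : PySem.Int.floordiv (-1) 2 = -1 := by decide
        simp at hi
        omega
      have hcast : ((k : Int) - 1) = ((k - 1 : Nat) : Int) := by omega
      have hfd : PySem.Int.floordiv ((k - 1 : Nat) : Int) 2 = (((k - 1) / 2 : Nat) : Int) := by
        exact_mod_cast PySem.Int.floordiv_natCast (k - 1) 2
      rw [hcast, hfd] at hi
      set m : Nat := i.toNat with hm
      have him : i = (m : Int) := by omega
      have hmlt : m ≤ (k - 1) / 2 := by omega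
      have hm1 : m < k := by omega
      have hm2 : k - m - 1 < k := by omega
      have e1 : ((k : Int) - i - 1) = ((k - m - 1 : Nat) : Int) := by omega
      rw [him] at ha; rw [e1] at hb
      have hga := ((hinv.2 m (by omega)).1 hm1 a).mp ha
      have hgb := ((hinv.2 (k - m - 1) (by omega)).1 hm2 b).mp hb
      rcases (pvOps6_iff a b x).mp hops with h4 | h4
      · have : k + 1 - (m + 1) = k - m - 1 + 1 := by omega
        exact pvReach.comb (i := m + 1) (by omega) (by omega) hga (by rwa [this]) h4
      · have : k + 1 - (k - m - 1 + 1) = m + 1 := by omega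
        exact pvReach.comb (i := k - m - 1 + 1) (by omega) (by omega) hgb (by rwa [this]) h4
  · intro h
    cases h with
    | rep _ hc =>
      left; rw [hbase]; simp [PySem.Set.mem_ofList]
    | @comb i _ a b _ h1 h2 hra hrb hops =>
      right
      have hk1 : 1 ≤ k := by omega
      have hi2 : i ≤ k := by omega
      have hbound : PySem.Int.floordiv ((k : Int) - 1) 2 + 1 = (((k - 1) / 2 : Nat) : Int) + 1 := by
        rw [show ((k : Int) - 1) = ((k - 1 : Nat) : Int) by omega]
        exact_mod_cast congrArg (fun z : Int => z + 1)
          (show PySem.Int.floordiv ((k - 1 : Nat) : Int) 2 = (((k - 1) / 2 : Nat) : Int) from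
            by exact_mod_cast PySem.Int.floordiv_natCast (k - 1) 2)
      by_cases hhalf : i - 1 ≤ (k - 1) / 2
      · refine ⟨((i - 1 : Nat) : Int), ?_, a, ?_, b, ?_, (pvOps6_iff a b x).mpr (Or.inl hops)⟩
        · rw [PySem.List.mem_pyRange_one, hbound]; omega
        · exact ((hinv.2 (i - 1) (by omega)).1 (by omega) a).mpr
            (by rwa [show i - 1 + 1 = i by omega])
        · rw [show (k : Int) - ((i - 1 : Nat) : Int) - 1 = ((k - i : Nat) : Int) by omega]
          exact ((hinv.2 (k - i) (by omega)).1 (by omega) b).mpr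
            (by rwa [show k - i + 1 = k + 1 - i by omega])
      · refine ⟨((k - i : Nat) : Int), ?_, b, ?_, a, ?_, (pvOps6_iff b a x).mpr (Or.inr hops)⟩
        · rw [PySem.List.mem_pyRange_one, hbound]; omega
        · exact ((hinv.2 (k - i) (by omega)).1 (by omega) b).mpr
            (by rwa [show k - i + 1 = k + 1 - i by omega])
        · rw [show (k : Int) - ((k - i : Nat) : Int) - 1 = ((i - 1 : Nat) : Int) by omega]
          exact ((hinv.2 (i - 1) (by omega)).1 (by omega) a).mpr
            (by rwa [show i - 1 + 1 = i by omega])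

theorem pv_invA_step (N : Int) (dp : List (PySem.Set Int)) (k : Nat)
    (hA : pvInvA N dp k) (hklt : k < 8) :
    pvInvA N (PySem.List.pySetD dp (k : Int) (pvCombineA dp k)) (k + 1) := by
  have hgA := pv_combineA_good N dp k hA hklt
  refine ⟨by rw [PySem.List.length_pySetD]; exact hA.1, ?_⟩
  intro j hj
  have hklen : k < dp.length := by have h8 := hA.1; omega
  have hget : ∀ (d : PySem.Set Int),
      PySem.List.pyGetD (PySem.List.pySetD dp (k : Int) (pvCombineA dp k)) (j : Int) d =
      if j = k then pvCombineA dp k else PySem.List.pyGetD dp (j : Int) d := by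
    intro d
    exact PySem.List.pyGetD_pySetD_natCast dp k j _ d hklen
  constructor
  · intro hjk x
    rw [hget]
    by_cases hjek : j = k
    · subst hjek
      simp only [if_true]
      exact hgA x
    · rw [if_neg hjek]
      exact (hA.2 j hj).1 (by omega) x
  · intro hjk
    rw [hget, if_neg (by omega : ¬ j = k)]
    exact (hA.2 j hj).2 (by omega)

theorem pv_initA (N : Int) :
    pvInvA N ((PySem.List.pyRange 1 9 1).map (fun i => PySem.Set.ofList [pvRepunit N i.toNat])) 0 := by
  constructor
  · simp [PySem.List.length_pyRange_one]
  · intro j hj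
    refine ⟨fun h => absurd h (by omega), fun _ => ?_⟩
    rw [PySem.List.pyGetD_map_pyRange_one _ 1 9 j _ (by omega),
      show (1 + (j : Int)).toNat = j + 1 by omega]

theorem pv_contains_level (N number : Int) (dp : List (PySem.Set Int)) (k : Nat)
    (hA : pvInvA N dp k) (hk : k < 8) :
    (PySem.Set.contains (pvCombineA dp k) number = true) ↔ pvReach N (k + 1) number := by
  have hg := pv_combineA_good N dp k hA hk
  constructor
  · intro h; exact (hg number).mp ((PySem.Set.contains_iff _ _).mp h)
  · intro h; exact (PySem.Set.contains_iff _ _).mpr ((hg number).mpr h)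

theorem pv_loopA_found (N number : Int) : ∀ (n k : Nat) (dp : List (PySem.Set Int)) (m : Nat),
    k + n = 8 → pvInvA N dp k → k < m → m ≤ 8 → pvReach N m number →
    (∀ j, k < j → j < m → ¬ pvReach N j number) → pvLoopA N number dp k = (m : Int) := by
  intro n
  induction n with
  | zero => intro k dp m hk _ h1 h2 _ _; omega
  | succ n ih =>
    intro k dp m hk hA h1 h2 hR hmin
    have hklt : k < 8 := by omega
    rw [pvLoopA, if_pos hklt]
    by_cases hm : m = k + 1
    · have hc : PySem.Set.contains (pvCombineA dp k) number = true :=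
        (pv_contains_level N number dp k hA hklt).mpr (hm ▸ hR)
      simp only [hc, if_true]
      subst hm
      push_cast
      ring
    · have hnc : ¬ (PySem.Set.contains (pvCombineA dp k) number = true) := by
        rw [pv_contains_level N number dp k hA hklt]
        exact hmin (k + 1) (by omega) (by omega)
      rw [Bool.not_eq_true] at hnc
      simp only [hnc, Bool.false_eq_true, if_false]
      exact ih (k + 1) _ m (by omega) (pv_invA_step N dp k hA hklt) (by omega) h2 hR
        (fun j hj1 hj2 => hmin j (by omega) hj2)

theorem pv_loopA_none (N number : Int) : ∀ (n k : Nat) (dp : List (PySem.Set Int)),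
    k + n = 8 → pvInvA N dp k → (∀ j, k < j → j ≤ 8 → ¬ pvReach N j number) →
    pvLoopA N number dp k = -1 := by
  intro n
  induction n with
  | zero =>
    intro k dp hk _ _
    have : k = 8 := by omega
    subst this
    rw [pvLoopA]
    norm_num
  | succ n ih =>
    intro k dp hk hA hno
    have hklt : k < 8 := by omega
    rw [pvLoopA, if_pos hklt]
    have hnc : ¬ (PySem.Set.contains (pvCombineA dp k) number = true) := by
      rw [pv_contains_level N number dp k hA hklt]
      exact hno (k + 1) (by omega) (by omega)
    rw [Bool.not_eq_true] at hnc
    simp only [hnc, Bool.false_eq_true, if_false]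
    exact ih (k + 1) _ (by omega) (pv_invA_step N dp k hA hklt)
      (fun j hj1 hj2 => hno j (by omega) hj2)

-- ===== B-side lemmas =====

theorem pv_mem_opsPush (v u x : Int) (l : List Int) :
    x ∈ pvOpsPush v u l ↔ x ∈ l ∨ pvOps6 v u x := by
  unfold pvOpsPush pvOps6
  by_cases hu : u = 0 <;> by_cases hv : v = 0 <;> simp [hu, hv] <;> tauto

theorem pv_mem_foldl_opsPush (v : Int) (us : List Int) (l : List Int) (x : Int) :
    x ∈ us.foldl (fun b u => pvOpsPush v u b) l ↔ x ∈ l ∨ ∃ u ∈ us, pvOps6 v u x := by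
  induction us generalizing l with
  | nil => simp
  | cons u t ih =>
    rw [List.foldl_cons, ih, pv_mem_opsPush]
    simp only [List.mem_cons]
    constructor
    · rintro ((h | h) | ⟨z, hz, hp⟩)
      · exact Or.inl h
      · exact Or.inr ⟨u, Or.inl rfl, h⟩
      · exact Or.inr ⟨z, Or.inr hz, hp⟩
    · rintro (h | ⟨z, (rfl | hz), hp⟩)
      · exact Or.inl (Or.inl h)
      · exact Or.inl (Or.inr hp)
      · exact Or.inr ⟨z, hz, hp⟩

theorem pv_getD_set (p : List (List Int)) (i : Nat) (x : List Int) (t : Nat)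
    (h : i < p.length) :
    (p.set i x).getD t [] = if t = i then x else p.getD t [] := by
  by_cases ht : t = i
  · subst ht
    simp [List.getD, h]
  · have hne : i ≠ t := fun hh => ht hh.symm
    simp [List.getD, hne, ht]

theorem pv_combineB_length (v : Int) (c : Nat) (byc pending : List (List Int))
    (hp : pending.length = 9) : (pvCombineB v c byc pending).length = 9 := by
  unfold pvCombineB
  generalize List.range' 1 (8 - c) = l
  induction l generalizing pending with
  | nil => exact hp
  | cons a t ih => exact ih _ (by rw [List.length_set]; exact hp)

theorem pv_getD_combineB (v : Int) (c : Nat) (byc pending : List (List Int))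
    (hp : pending.length = 9) (hc8 : c ≤ 8) (t : Nat) :
    (pvCombineB v c byc pending).getD t [] =
      if c + 1 ≤ t ∧ t ≤ 8 then
        ((byc.getD (t - c) []).reverse).foldl (fun b u => pvOpsPush v u b) (pending.getD t [])
      else pending.getD t [] := by
  unfold pvCombineB
  have main : ∀ (n : Nat) (pending : List (List Int)), pending.length = 9 → c + n ≤ 8 →
      ((List.range' 1 n).foldl (fun p cu =>
        p.set (c + cu) (((byc.getD cu []).reverse).foldl (fun b u => pvOpsPush v u b)
          (p.getD (c + cu) []))) pending).getD t [] =
      if c + 1 ≤ t ∧ t ≤ c + n then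
        ((byc.getD (t - c) []).reverse).foldl (fun b u => pvOpsPush v u b) (pending.getD t [])
      else pending.getD t [] := by
    intro n
    induction n with
    | zero =>
      intro pending hlen hcn
      rw [if_neg (by omega)]
      rfl
    | succ n ih =>
      intro pending hlen hcn
      rw [List.range'_concat, List.foldl_append, List.foldl_cons, List.foldl_nil]
      simp only [Nat.one_mul]
      have hlen' : ((List.range' 1 n).foldl (fun p cu =>
          p.set (c + cu) (((byc.getD cu []).reverse).foldl (fun b u => pvOpsPush v u b)
            (p.getD (c + cu) []))) pending).length = 9 := by
        generalize List.range' 1 n = l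
        clear ih
        induction l generalizing pending with
        | nil => exact hlen
        | cons a tl ihl => exact ihl _ (by rw [List.length_set]; exact hlen)
      rw [pv_getD_set _ _ _ _ (by omega)]
      by_cases ht : t = c + (1 + n)
      · rw [if_pos ht, if_pos (by omega)]
        have e1 : c + (1 + n) = t := ht.symm
        rw [e1, ih pending hlen (by omega), if_neg (by omega)]
        rw [show (1 : Nat) + n = t - c by omega]
      · rw [if_neg ht, ih pending hlen (by omega)]
        by_cases h2 : c + 1 ≤ t ∧ t ≤ c + n
        · rw [if_pos h2, if_pos (by omega)]
        · rw [if_neg h2, if_neg (by omega)]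
  have := main (8 - c) pending hp (by omega)
  rw [this, show c + (8 - c) = 8 by omega]

theorem pv_mem_combineB (v : Int) (c : Nat) (byc pending : List (List Int))
    (hp : pending.length = 9) (hc8 : c ≤ 8) (t : Nat) (x : Int) :
    x ∈ (pvCombineB v c byc pending).getD t [] ↔
      x ∈ pending.getD t [] ∨
        (c + 1 ≤ t ∧ t ≤ 8 ∧ ∃ u ∈ byc.getD (t - c) [], pvOps6 v u x) := by
  rw [pv_getD_combineB v c byc pending hp hc8 t]
  by_cases h : c + 1 ≤ t ∧ t ≤ 8
  · rw [if_pos h, pv_mem_foldl_opsPush]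
    constructor
    · rintro (hx | ⟨u, hu, hops⟩)
      · exact Or.inl hx
      · exact Or.inr ⟨h.1, h.2, u, List.mem_reverse.mp hu, hops⟩
    · rintro (hx | ⟨_, _, u, hu, hops⟩)
      · exact Or.inl hx
      · exact Or.inr ⟨u, List.mem_reverse.mpr hu, hops⟩
  · rw [if_neg h]
    constructor
    · exact Or.inl
    · rintro (hx | ⟨h1, h2, _⟩)
      · exact hx
      · exact absurd ⟨h1, h2⟩ h

-- y settled at count k: either in an earlier, finished bucket, or in the current bucket's list T
def pvSettledAt (N : Int) (c : Nat) (T : List Int) (y : Int) (k : Nat) : Prop :=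
  (k < c ∧ pvMin N y k) ∨ (k = c ∧ y ∈ T)

-- invariant of pvBucketLoop while processing bucket c with remaining values vs
structure PVMid (N number : Int) (c : Nat) (vs : List Int) (seen : PySem.Set Int)
    (byc pending : List (List Int)) (T : List Int) : Prop where
  hlp : pending.length = 9
  hlb : byc.length = 9
  hc1 : 1 ≤ c
  hc8 : c ≤ 8
  hT : byc.getD c [] = T
  sound : ∀ k x, 1 ≤ k → k ≤ 8 → x ∈ pending.getD k [] → pvReach N k x
  rep : ∀ k, 1 ≤ k → k ≤ 8 → pvRepunit N k ∈ pending.getD k []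
  low : ∀ k x, k < c → (x ∈ byc.getD k [] ↔ pvMin N x k)
  high : ∀ k, c < k → byc.getD k [] = []
  tmin : ∀ x, x ∈ T → pvMin N x c ∧ x ≠ number
  seenc : ∀ x, x ∈ seen ↔ ((∃ k, k < c ∧ pvMin N x k) ∨ x ∈ T)
  vsound : ∀ u, u ∈ vs → pvReach N c u
  compl : ∀ x, pvMin N x c → x ∉ T → x ∈ vs
  push : ∀ a b ka kb x, pvSettledAt N c T a ka → pvSettledAt N c T b kb → ka + kb ≤ 8 →
      pvOps6 a b x → x ∈ pending.getD (ka + kb) []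
  hnot : ∀ j, 1 ≤ j → j < c → ¬ pvReach N j number

-- invariant of pvOuterB at the start of bucket c
structure PVOuter (N number : Int) (c : Nat) (seen : PySem.Set Int)
    (byc pending : List (List Int)) : Prop where
  hlp : pending.length = 9
  hlb : byc.length = 9
  hc1 : 1 ≤ c
  sound : ∀ k x, 1 ≤ k → k ≤ 8 → x ∈ pending.getD k [] → pvReach N k x
  rep : ∀ k, 1 ≤ k → k ≤ 8 → pvRepunit N k ∈ pending.getD k []
  low : ∀ k x, k < c → (x ∈ byc.getD k [] ↔ pvMin N x k)
  high : ∀ k, c ≤ k → byc.getD k [] = []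
  seenc : ∀ x, x ∈ seen ↔ ∃ k, k < c ∧ pvMin N x k
  push : ∀ a b ka kb x, ka < c → kb < c → pvMin N a ka → pvMin N b kb → ka + kb ≤ 8 →
      pvOps6 a b x → x ∈ pending.getD (ka + kb) []
  hnot : ∀ j, 1 ≤ j → j < c → ¬ pvReach N j number

theorem pv_enter_bucket (N number : Int) (c : Nat) (seen : PySem.Set Int)
    (byc pending : List (List Int)) (h : PVOuter N number c seen byc pending) (hc8 : c ≤ 8) :
    PVMid N number c ((pending.getD c []).reverse) seen byc pending [] := by
  refine ⟨h.hlp, h.hlb, h.hc1, hc8, h.high c le_rfl, h.sound, h.rep, h.low,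
    (fun k hk => h.high k (by omega)), (by simp), ?_, ?_, ?_, ?_, h.hnot⟩
  · intro x; rw [h.seenc x]; simp
  · intro u hu; exact h.sound c u h.hc1 hc8 (List.mem_reverse.mp hu)
  · -- completeness: every minimal-count-c value is already in pending[c]
    intro x hm _
    cases hm.1 with
    | rep _ hc => exact List.mem_reverse.mpr (h.rep c h.hc1 hc8)
    | @comb i _ a b _ h1 h2 ha hb hops =>
      obtain ⟨ka, hka, hamin⟩ := pv_exists_min N i a ha
      obtain ⟨kb, hkb, hbmin⟩ := pv_exists_min N (c - i) b hb
      have hka1 : 1 ≤ ka := pv_reach_pos _ _ _ hamin.1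
      have hkb1 : 1 ≤ kb := pv_reach_pos _ _ _ hbmin.1
      have hx : x ∈ pending.getD (ka + kb) [] :=
        h.push a b ka kb x (by omega) (by omega) hamin hbmin (by omega)
          ((pvOps6_iff a b x).mpr (Or.inl hops))
      have hRx : pvReach N (ka + kb) x := h.sound (ka + kb) x (by omega) (by omega) hx
      have hge : ¬ ka + kb < c := fun hlt => hm.2 _ hlt hRx
      have heq : ka + kb = c := by omega
      rw [heq] at hx
      exact List.mem_reverse.mpr hx
  · intro a b ka kb x hsa hsb hsum hops
    rcases hsa with ⟨hka, hma⟩ | ⟨_, hma⟩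
    · rcases hsb with ⟨hkb, hmb⟩ | ⟨_, hmb⟩
      · exact h.push a b ka kb x hka hkb hma hmb hsum hops
      · simp at hmb
    · simp at hma

theorem pv_mid_skip (N number v : Int) (c : Nat) (rest : List Int) (seen : PySem.Set Int)
    (byc pending : List (List Int)) (T : List Int)
    (h : PVMid N number c (v :: rest) seen byc pending T) (hv : v ∈ seen) :
    PVMid N number c rest seen byc pending T := by
  refine ⟨h.hlp, h.hlb, h.hc1, h.hc8, h.hT, h.sound, h.rep, h.low, h.high, h.tmin, h.seenc,
    (fun u hu => h.vsound u (by simp [hu])), ?_, h.push, h.hnot⟩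
  intro x hm hT
  have hx := h.compl x hm hT
  rcases List.mem_cons.mp hx with rfl | hr
  · exfalso
    rcases (h.seenc x).mp hv with ⟨k, hk, hkm⟩ | hT'
    · exact absurd (pv_min_unique hm hkm) (by omega)
    · exact hT hT'
  · exact hr

theorem pv_mid_step (N number v : Int) (c : Nat) (rest : List Int) (seen : PySem.Set Int)
    (byc pending : List (List Int)) (T : List Int)
    (h : PVMid N number c (v :: rest) seen byc pending T)
    (hns : v ∉ seen) (hnn : v ≠ number) :
    PVMid N number c rest (PySem.Set.add seen v) (byc.set c (v :: byc.getD c []))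
      (pvCombineB v c (byc.set c (v :: byc.getD c [])) pending) (v :: T) := by
  have hvR : pvReach N c v := h.vsound v (by simp)
  have hvmin : pvMin N v c := by
    obtain ⟨m, hm, hmin⟩ := pv_exists_min N c v hvR
    rcases Nat.lt_or_ge m c with hlt | hge
    · exact absurd ((h.seenc v).mpr (Or.inl ⟨m, hlt, hmin⟩)) hns
    · have : m = c := by omega
      exact this ▸ hmin
  have hgb : ∀ k, (byc.set c (v :: byc.getD c [])).getD k [] =
      if k = c then v :: T else byc.getD k [] := by
    intro k
    rw [pv_getD_set byc c _ k (by rw [h.hlb]; have := h.hc8; omega), h.hT]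
  have hmemP : ∀ t x, x ∈ (pvCombineB v c (byc.set c (v :: byc.getD c [])) pending).getD t [] ↔
      x ∈ pending.getD t [] ∨
        (c + 1 ≤ t ∧ t ≤ 8 ∧ ∃ u ∈ (byc.set c (v :: byc.getD c [])).getD (t - c) [],
          pvOps6 v u x) :=
    fun t x => pv_mem_combineB v c _ pending h.hlp h.hc8 t x
  refine ⟨pv_combineB_length v c _ pending h.hlp, by rw [List.length_set]; exact h.hlb,
    h.hc1, h.hc8, (by rw [hgb]; simp), ?_, ?_, ?_, ?_, ?_, ?_, ?_, ?_, ?_, h.hnot⟩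
  · -- sound
    intro k x hk1 hk8 hx
    rcases (hmemP k x).mp hx with hold | ⟨hck, hk8', u, hu, hops⟩
    · exact h.sound k x hk1 hk8 hold
    · rw [hgb] at hu
      have huR : pvReach N (k - c) u := by
        by_cases hkc : k - c = c
        · rw [if_pos hkc] at hu
          rw [hkc]
          rcases List.mem_cons.mp hu with hv' | hT
          · rw [hv']; exact hvR
          · exact (h.tmin u hT).1.1
        · rw [if_neg hkc] at hu
          rcases Nat.lt_or_ge (k - c) c with hlt | hge
          · exact ((h.low (k - c) u hlt).mp hu).1
          · have hgt : c < k - c := by omega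
            rw [h.high _ hgt] at hu
            simp at hu
      have := pv_reach_ops6 hvR huR hops
      rwa [show c + (k - c) = k by omega] at this
  · -- rep
    intro k hk1 hk8
    exact (hmemP k _).mpr (Or.inl (h.rep k hk1 hk8))
  · -- low
    intro k x hk
    rw [hgb, if_neg (by omega)]
    exact h.low k x hk
  · -- high
    intro k hk
    rw [hgb, if_neg (by omega)]
    exact h.high k hk
  · -- tmin
    intro x hx
    rcases List.mem_cons.mp hx with hv' | hT
    · subst hv'; exact ⟨hvmin, hnn⟩
    · exact h.tmin x hT
  · -- seenc
    intro x
    rw [PySem.Set.mem_add, h.seenc x]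
    simp only [List.mem_cons]
    constructor
    · rintro ((h1 | h1) | h1)
      · exact Or.inl h1
      · exact Or.inr (Or.inr h1)
      · exact Or.inr (Or.inl h1)
    · rintro (h1 | h1 | h1)
      · exact Or.inl (Or.inl h1)
      · exact Or.inr h1
      · exact Or.inl (Or.inr h1)
  · -- vsound
    intro u hu
    exact h.vsound u (by simp [hu])
  · -- compl
    intro x hm hT'
    have hx := h.compl x hm (fun ht => hT' (List.mem_cons.mpr (Or.inr ht)))
    rcases List.mem_cons.mp hx with rfl | hr
    · exact absurd (List.mem_cons.mpr (Or.inl rfl)) hT'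
    · exact hr
  · -- push
    intro a b ka kb x hsa hsb hsum hops
    have hpart : ∀ y k, pvSettledAt N c (v :: T) y k →
        (1 ≤ k ∧ k ≤ c ∧ y ∈ (byc.set c (v :: byc.getD c [])).getD k []) := by
      intro y k hy
      rcases hy with ⟨hk, hm⟩ | ⟨hk, hmem⟩
      · refine ⟨pv_reach_pos _ _ _ hm.1, by omega, ?_⟩
        rw [hgb, if_neg (by omega)]
        exact (h.low k y hk).mpr hm
      · subst hk
        exact ⟨h.hc1, le_rfl, by rw [hgb, if_pos rfl]; exact hmem⟩
    have hsplit : ∀ y k, pvSettledAt N c (v :: T) y k →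
        (pvSettledAt N c T y k ∨ (k = c ∧ y = v)) := by
      intro y k hy
      rcases hy with ⟨hk, hm⟩ | ⟨hk, hmem⟩
      · exact Or.inl (Or.inl ⟨hk, hm⟩)
      · rcases List.mem_cons.mp hmem with hv' | hT
        · exact Or.inr ⟨hk, hv'⟩
        · exact Or.inl (Or.inr ⟨hk, hT⟩)
    rcases hsplit a ka hsa with hA | ⟨hkac, hav⟩
    · rcases hsplit b kb hsb with hB | ⟨hkbc, hbv⟩
      · exact (hmemP _ x).mpr (Or.inl (h.push a b ka kb x hA hB hsum hops))
      · -- b = v, kb = c : push via partner a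
        obtain ⟨hka1, hkac', hamem⟩ := hpart a ka hsa
        have hops' : pvOps6 v a x := (pv_ops6_symm a v x).mp (by rwa [hbv] at hops)
        refine (hmemP (ka + kb) x).mpr (Or.inr ⟨by omega, by omega, a, ?_, hops'⟩)
        rw [show ka + kb - c = ka by omega]
        exact hamem
    · -- a = v : push via partner b
      obtain ⟨hkb1, hkbc', hbmem⟩ := hpart b kb hsb
      have hops' : pvOps6 v b x := by rwa [hav] at hops
      refine (hmemP (ka + kb) x).mpr (Or.inr ⟨by omega, by omega, b, ?_, hops'⟩)
      rw [show ka + kb - c = kb by omega]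
      exact hbmem

theorem pv_bucket_found (N number : Int) (c : Nat) : ∀ (vs : List Int) (seen : PySem.Set Int)
    (byc pending : List (List Int)) (T : List Int),
    PVMid N number c vs seen byc pending T → pvMin N number c →
    pvBucketLoop number c vs seen byc pending = Sum.inl (c : Int) := by
  intro vs
  induction vs with
  | nil =>
    intro seen byc pending T h hm
    exact absurd (h.compl number hm (fun hT => (h.tmin number hT).2 rfl)) (by simp)
  | cons v rest ih =>
    intro seen byc pending T h hm
    rw [pvBucketLoop]
    by_cases hv : v ∈ seen
    · rw [if_pos ((PySem.Set.contains_iff _ _).mpr hv)]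
      exact ih _ _ _ T (pv_mid_skip N number v c rest seen byc pending T h hv) hm
    · rw [if_neg (fun hc => hv ((PySem.Set.contains_iff _ _).mp hc))]
      by_cases hvn : v = number
      · rw [if_pos hvn]
      · rw [if_neg hvn]
        exact ih _ _ _ (v :: T) (pv_mid_step N number v c rest seen byc pending T h hv hvn) hm

theorem pv_bucket_notfound (N number : Int) (c : Nat) : ∀ (vs : List Int)
    (seen : PySem.Set Int) (byc pending : List (List Int)) (T : List Int),
    PVMid N number c vs seen byc pending T → ¬ pvReach N c number →
    ∃ seen' byc' pending' T',
      pvBucketLoop number c vs seen byc pending = Sum.inr (seen', byc', pending') ∧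
      PVMid N number c [] seen' byc' pending' T' := by
  intro vs
  induction vs with
  | nil =>
    intro seen byc pending T h _
    exact ⟨seen, byc, pending, T, rfl, h⟩
  | cons v rest ih =>
    intro seen byc pending T h hnc
    rw [pvBucketLoop]
    by_cases hv : v ∈ seen
    · rw [if_pos ((PySem.Set.contains_iff _ _).mpr hv)]
      exact ih _ _ _ T (pv_mid_skip N number v c rest seen byc pending T h hv) hnc
    · rw [if_neg (fun hc => hv ((PySem.Set.contains_iff _ _).mp hc))]
      have hvn : v ≠ number := by
        intro hvn
        exact hnc (hvn ▸ h.vsound v (by simp))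
      rw [if_neg hvn]
      exact ih _ _ _ (v :: T) (pv_mid_step N number v c rest seen byc pending T h hv hvn) hnc

theorem pv_exit_bucket {N number : Int} {c : Nat} {seen : PySem.Set Int}
    {byc pending : List (List Int)} {T : List Int}
    (h : PVMid N number c [] seen byc pending T) (hnc : ¬ pvReach N c number) :
    PVOuter N number (c + 1) seen byc pending := by
  have hTiff : ∀ x, x ∈ T ↔ pvMin N x c := by
    intro x
    constructor
    · exact fun hx => (h.tmin x hx).1
    · intro hm
      by_contra hnT
      exact absurd (h.compl x hm hnT) (by simp)
  refine ⟨h.hlp, h.hlb, by omega, h.sound, h.rep, ?_, ?_, ?_, ?_, ?_⟩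
  · intro k x hk
    rcases Nat.lt_or_ge k c with hlt | hge
    · exact h.low k x hlt
    · have : k = c := by omega
      subst this
      rw [h.hT]
      exact hTiff x
  · intro k hk
    exact h.high k (by omega)
  · intro x
    rw [h.seenc x]
    constructor
    · rintro (⟨k, hk, hm⟩ | hT)
      · exact ⟨k, by omega, hm⟩
      · exact ⟨c, by omega, (hTiff x).mp hT⟩
    · rintro ⟨k, hk, hm⟩
      rcases Nat.lt_or_ge k c with hlt | hge
      · exact Or.inl ⟨k, hlt, hm⟩
      · have : k = c := by omega
        subst this
        exact Or.inr ((hTiff x).mpr hm)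
  · intro a b ka kb x hka hkb hma hmb hsum hops
    have hsa : pvSettledAt N c T a ka := by
      rcases Nat.lt_or_ge ka c with hlt | hge
      · exact Or.inl ⟨hlt, hma⟩
      · have h0 : ka = c := by omega
        subst h0
        exact Or.inr ⟨rfl, (hTiff a).mpr hma⟩
    have hsb : pvSettledAt N c T b kb := by
      rcases Nat.lt_or_ge kb c with hlt | hge
      · exact Or.inl ⟨hlt, hmb⟩
      · have h0 : kb = c := by omega
        subst h0
        exact Or.inr ⟨rfl, (hTiff b).mpr hmb⟩
    exact h.push a b ka kb x hsa hsb hsum hops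
  · intro j hj1 hj2
    rcases Nat.lt_or_ge j c with hlt | hge
    · exact h.hnot j hj1 hlt
    · have : j = c := by omega
      exact this ▸ hnc

theorem pv_outer_found (N number : Int) : ∀ (n c : Nat) (seen : PySem.Set Int)
    (byc pending : List (List Int)) (m : Nat),
    c + n = 9 → PVOuter N number c seen byc pending → c ≤ m → m ≤ 8 → pvReach N m number →
    (∀ j, c ≤ j → j < m → ¬ pvReach N j number) →
    pvOuterB number c seen byc pending = (m : Int) := by
  intro n
  induction n with
  | zero => intro c seen byc pending m hc _ h1 h2 _ _; omega
  | succ n ih =>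
    intro c seen byc pending m hc h hcm hm8 hR hmin
    have hc9 : c < 9 := by omega
    rw [pvOuterB, if_pos hc9]
    have hmid := pv_enter_bucket N number c seen byc pending h (by omega)
    by_cases hmc : m = c
    · have hminc : pvMin N number c := by
        refine ⟨hmc ▸ hR, ?_⟩
        intro j hj hRj
        exact h.hnot j (pv_reach_pos _ _ _ hRj) hj hRj
      rw [pv_bucket_found N number c ((pending.getD c []).reverse) seen byc pending [] hmid hminc, hmc]
    · have hnc : ¬ pvReach N c number := hmin c le_rfl (by omega)
      obtain ⟨s', b', p', T', heq, hmid'⟩ := pv_bucket_notfound N number c _ _ _ _ _ hmid hnc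
      rw [heq]
      exact ih (c + 1) s' b' p' m (by omega) (pv_exit_bucket hmid' hnc) (by omega) hm8 hR
        (fun j hj1 hj2 => hmin j (by omega) hj2)

theorem pv_outer_none (N number : Int) : ∀ (n c : Nat) (seen : PySem.Set Int)
    (byc pending : List (List Int)),
    c + n = 9 → PVOuter N number c seen byc pending →
    (∀ j, c ≤ j → j ≤ 8 → ¬ pvReach N j number) →
    pvOuterB number c seen byc pending = -1 := by
  intro n
  induction n with
  | zero =>
    intro c seen byc pending hc _ _
    have : c = 9 := by omega
    subst this
    rw [pvOuterB]
    norm_num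
  | succ n ih =>
    intro c seen byc pending hc h hno
    have hc9 : c < 9 := by omega
    rw [pvOuterB, if_pos hc9]
    have hmid := pv_enter_bucket N number c seen byc pending h (by omega)
    have hnc : ¬ pvReach N c number := hno c le_rfl (by omega)
    obtain ⟨s', b', p', T', heq, hmid'⟩ := pv_bucket_notfound N number c _ _ _ _ _ hmid hnc
    rw [heq]
    exact ih (c + 1) s' b' p' (by omega) (pv_exit_bucket hmid' hnc)
      (fun j hj1 hj2 => hno j (by omega) hj2)

theorem pv_getD_rep9 (k : Nat) : (List.replicate 9 ([] : List Int)).getD k [] = [] := by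
  rcases Nat.lt_or_ge k 9 with hlt | hge
  · interval_cases k <;> rfl
  · rw [List.getD_eq_default]
    simpa using hge

theorem pv_initB (N number : Int) :
    PVOuter N number 1 PySem.Set.empty (List.replicate 9 [])
      ((List.range' 1 8).foldl (fun p k => p.set k (pvRepunit N k :: p.getD k []))
        (List.replicate 9 ([] : List Int))) := by
  have hpe : (List.range' 1 8).foldl (fun p k => p.set k (pvRepunit N k :: p.getD k []))
      (List.replicate 9 ([] : List Int)) =
      [[], [pvRepunit N 1], [pvRepunit N 2], [pvRepunit N 3], [pvRepunit N 4],
        [pvRepunit N 5], [pvRepunit N 6], [pvRepunit N 7], [pvRepunit N 8]] := by rfl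
  rw [hpe]
  refine ⟨rfl, rfl, le_rfl, ?_, ?_, ?_, ?_, ?_, ?_, ?_⟩
  · intro k x hk1 hk8 hx
    interval_cases k <;> simp [List.getD] at hx <;>
      (rw [hx]; exact pvReach.rep _ (by omega))
  · intro k hk1 hk8
    interval_cases k <;> simp [List.getD]
  · intro k x hk
    have : k = 0 := by omega
    subst this
    rw [pv_getD_rep9 0]
    simp only [List.not_mem_nil, false_iff]
    intro hm
    exact absurd (pv_reach_pos _ _ _ hm.1) (by omega)
  · intro k _
    exact pv_getD_rep9 k
  · intro x
    constructor
    · intro hx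
      exact absurd hx (by simp [PySem.Set.empty])
    · rintro ⟨k, hk, hm⟩
      have : k = 0 := by omega
      subst this
      exact absurd (pv_reach_pos _ _ _ hm.1) (by omega)
  · intro a b ka kb x hka _ hma _ _ _
    have : ka = 0 := by omega
    subst this
    exact absurd (pv_reach_pos _ _ _ hma.1) (by omega)
  · intro j hj1 hj2
    omega

-- ===== VERDICT =====
theorem solution_spec : Claim_equal_solution := by
  intro N number _ _
  unfold Spec_solution solution solution_alt
  by_cases h : ∃ m, 1 ≤ m ∧ m ≤ 8 ∧ pvReach N m number
  · obtain ⟨m0, hm1, hm8, hR⟩ := h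
    obtain ⟨m, hmle, hmin⟩ := pv_exists_min N m0 number hR
    have hm1' : 1 ≤ m := pv_reach_pos _ _ _ hmin.1
    rw [pv_loopA_found N number 8 0 _ m rfl (pv_initA N) (by omega) (by omega) hmin.1
        (fun j _ hj2 => hmin.2 j hj2),
      pv_outer_found N number 8 1 _ _ _ m rfl (pv_initB N number) (by omega) (by omega) hmin.1
        (fun j _ hj2 => hmin.2 j hj2)]
  · have hno : ∀ m, 1 ≤ m → m ≤ 8 → ¬ pvReach N m number :=
      fun m h1 h2 hR => h ⟨m, h1, h2, hR⟩
    rw [pv_loopA_none N number 8 0 _ rfl (pv_initA N)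
        (fun j hj1 hj2 => hno j (by omega) hj2),
      pv_outer_none N number 8 1 _ _ _ rfl (pv_initB N number)
        (fun j hj1 hj2 => hno j (by omega) hj2)]
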